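-- pv_equiv track=rewrite | github.com/jiran214/gpt-func-calling | src/string_process.py | filter_html
-- ===== SOURCE A (Python) =====
-- from typing import List
--
-- Limit = 1500
--
-- def filter_html(text_list: List[str]):
--     new_text_list = []
--     current_len = 0
--     is_newline_character_last = False
--     for text in text_list:
--         if text == '\n':
--             if is_newline_character_last is False:
--                 new_text_list.append(' ')
--                 current_len += len(text)
--                 is_newline_character_last = True
--         else:
--             is_newline_character_last = False
--             new_text_list.append(text)
--             current_len += len(text)
--
--         if current_len > Limit:
--             break
--     return ''.join(new_text_list)
-- ===== SOURCE B (Python) =====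
-- Limit = 1500
--
-- def filter_html(text_list):
--     # Pass 1: collapse each maximal run of '\n' items into a single ' ' item.
--     collapsed = []
--     prev_newline = False
--     for text in text_list:
--         if text == '\n':
--             if not prev_newline:
--                 collapsed.append(' ')
--             prev_newline = True
--         else:
--             collapsed.append(text)
--             prev_newline = False
--     # Pass 2: take items until the running length exceeds Limit (keep the overflowing item).
--     result = []
--     total = 0
--     for s in collapsed:
--         result.append(s)
--         total += len(s)
--         if total > Limit:
--             break
--     return ''.join(result)
-- ===== Notes on version B (the rewrite author's own statement) =====
-- stated objective: simpler
-- what changed: Splits A's single loop with three intertwined state variables into two independent passes: one collapses newline runs to single spaces, the other truncates at the length limit.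
import Mathlib
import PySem

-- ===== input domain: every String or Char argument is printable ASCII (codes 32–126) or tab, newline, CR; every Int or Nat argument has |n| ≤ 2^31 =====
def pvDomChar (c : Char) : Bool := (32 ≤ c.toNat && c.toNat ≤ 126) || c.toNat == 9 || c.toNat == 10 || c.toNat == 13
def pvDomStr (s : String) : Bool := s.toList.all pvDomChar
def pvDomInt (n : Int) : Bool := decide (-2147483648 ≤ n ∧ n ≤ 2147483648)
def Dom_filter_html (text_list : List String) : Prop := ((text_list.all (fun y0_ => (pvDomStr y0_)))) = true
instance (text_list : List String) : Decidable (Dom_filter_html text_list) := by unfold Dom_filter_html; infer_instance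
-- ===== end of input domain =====

-- B collapses newline runs and truncates at the limit in two separate passes instead of A's one loop with three state variables.

-- ===== PORT A =====
-- A's single for-loop with break: state (new_text_list, current_len, is_newline_character_last).
def pvALoop (l : List String) (acc : List String) (len : Int) (last : Bool) : List String :=
  match l with
  | [] => acc
  | text :: rest =>
    if text = "\n" then
      if last = false then
        let acc' := acc ++ [" "]
        let len' := len + PySem.Str.len text
        if len' > 1500 then acc' else pvALoop rest acc' len' true
      else
        if len > 1500 then acc else pvALoop rest acc len last
    else
      let acc' := acc ++ [text]
      let len' := len + PySem.Str.len text
      if len' > 1500 then acc' else pvALoop rest acc' len' false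

def filter_html (text_list : List String) : String :=
  PySem.Str.join "" (pvALoop text_list [] 0 false)

-- ===== PORT B =====
-- Pass 1: collapse each maximal run of "\n" items into a single " " item.
def pvCollapse (l : List String) (prev : Bool) : List String :=
  match l with
  | [] => []
  | text :: rest =>
    if text = "\n" then
      if prev then pvCollapse rest true else " " :: pvCollapse rest true
    else
      text :: pvCollapse rest false

-- Pass 2: take items until the running length exceeds the limit (keep the overflowing item).
def pvTrunc (l : List String) (total : Int) : List String :=
  match l with
  | [] => []
  | s :: rest =>
    let total' := total + PySem.Str.len s
    if total' > 1500 then [s] else s :: pvTrunc rest total'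

def filter_html_alt (text_list : List String) : String :=
  PySem.Str.join "" (pvTrunc (pvCollapse text_list false) 0)

-- ===== PRECONDITION & SPEC =====
def Spec_filter_html (text_list : List String) (out : String) : Prop := out = filter_html_alt text_list
instance (text_list : List String) (out : String) : Decidable (Spec_filter_html text_list out) := by unfold Spec_filter_html; infer_instance

-- ===== CLAIM (what is proved, stated in full; the proofs are below) =====
def Claim_equal_filter_html : Prop := ∀ (text_list : List String), Dom_filter_html text_list → Spec_filter_html text_list (filter_html text_list)

-- ===== LEMMAS AND PROOFS =====
-- Loop invariant: while A's loop is running, current_len ≤ 1500, and the remainder of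
-- A's loop equals the truncation of the collapsed remainder, appended to the accumulator.
theorem pvTrunc_cons (s : String) (rest : List String) (total : Int) :
    pvTrunc (s :: rest) total =
      if total + PySem.Str.len s > 1500 then [s]
      else s :: pvTrunc rest (total + PySem.Str.len s) := rfl

theorem pvALoop_eq (l : List String) : ∀ (acc : List String) (len : Int) (last : Bool),
    len ≤ 1500 → pvALoop l acc len last = acc ++ pvTrunc (pvCollapse l last) len := by
  induction l with
  | nil => intro acc len last _; simp [pvALoop, pvCollapse, pvTrunc]
  | cons text rest ih =>
    intro acc len last hlen
    by_cases ht : text = "\n"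
    · subst ht
      cases last with
      | false =>
        have hs : PySem.Str.len "\n" = PySem.Str.len " " := by decide
        rw [show pvALoop ("\n" :: rest) acc len false =
              (if len + PySem.Str.len "\n" > 1500 then acc ++ [" "]
               else pvALoop rest (acc ++ [" "]) (len + PySem.Str.len "\n") true) from rfl,
            show pvCollapse ("\n" :: rest) false = " " :: pvCollapse rest true from rfl,
            pvTrunc_cons]
        by_cases hb : len + PySem.Str.len "\n" > 1500
        · rw [if_pos hb, if_pos (hs ▸ hb)]
        · rw [if_neg hb, if_neg (hs ▸ hb), ih _ _ true (by omega), hs, List.append_assoc,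
              List.singleton_append]
      | true =>
        have hnb : ¬ (len > 1500) := by omega
        rw [show pvALoop ("\n" :: rest) acc len true =
              (if len > 1500 then acc else pvALoop rest acc len true) from rfl,
            if_neg hnb,
            show pvCollapse ("\n" :: rest) true = pvCollapse rest true from rfl]
        exact ih acc len true hlen
    · rw [show pvALoop (text :: rest) acc len last =
            (if text = "\n" then
               (if last = false then
                  (if len + PySem.Str.len text > 1500 then acc ++ [" "]
                   else pvALoop rest (acc ++ [" "]) (len + PySem.Str.len text) true)
                else if len > 1500 then acc else pvALoop rest acc len last)
             else (if len + PySem.Str.len text > 1500 then acc ++ [text]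
                   else pvALoop rest (acc ++ [text]) (len + PySem.Str.len text) false)) from rfl,
          if_neg ht,
          show pvCollapse (text :: rest) last =
            (if text = "\n" then (if last then pvCollapse rest true else " " :: pvCollapse rest true)
             else text :: pvCollapse rest false) from rfl,
          if_neg ht, pvTrunc_cons]
      by_cases hb : len + PySem.Str.len text > 1500
      · rw [if_pos hb, if_pos hb]
      · rw [if_neg hb, if_neg hb, ih _ _ false (by omega), List.append_assoc,
            List.singleton_append]

-- ===== VERDICT (by name: the statement is the Claim_ definition above) =====
theorem filter_html_spec : Claim_equal_filter_html := by
  intro text_list _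
  unfold Spec_filter_html filter_html filter_html_alt
  rw [pvALoop_eq text_list [] 0 false (by norm_num)]
  simp
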